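-- pv_equiv track=rewrite | github.com/ameyarawat/password-strength-checker-cli | password_strength_checker.py | has_repeated_runs
-- ===== SOURCE A (Python) =====
-- def has_repeated_runs(text: str, min_run: int = 3) -> bool:
--     if not text:
--         return False
--     run = 1
--     for i in range(1, len(text)):
--         if text[i] == text[i - 1]:
--             run += 1
--             if run >= min_run:
--                 return True
--         else:
--             run = 1
--     return False
-- ===== SOURCE B (Python) =====
-- def has_repeated_runs(text: str, min_run: int = 3) -> bool:
--     # A run of length >= max(min_run, 2) exists iff some character repeated
--     # that many times occurs as a substring (A never flags a run shorter than 2).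
--     needed = max(min_run, 2)
--     if needed > len(text):
--         return False
--     return any(ch * needed in text for ch in set(text))
-- ===== Notes on version B (the rewrite author's own statement) =====
-- stated objective: simpler
-- what changed: Replaces the explicit index loop with a run counter by a substring test: a qualifying run exists iff ch*max(min_run,2) occurs in text for some distinct character, with an early False when the threshold exceeds len(text).
import Mathlib
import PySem

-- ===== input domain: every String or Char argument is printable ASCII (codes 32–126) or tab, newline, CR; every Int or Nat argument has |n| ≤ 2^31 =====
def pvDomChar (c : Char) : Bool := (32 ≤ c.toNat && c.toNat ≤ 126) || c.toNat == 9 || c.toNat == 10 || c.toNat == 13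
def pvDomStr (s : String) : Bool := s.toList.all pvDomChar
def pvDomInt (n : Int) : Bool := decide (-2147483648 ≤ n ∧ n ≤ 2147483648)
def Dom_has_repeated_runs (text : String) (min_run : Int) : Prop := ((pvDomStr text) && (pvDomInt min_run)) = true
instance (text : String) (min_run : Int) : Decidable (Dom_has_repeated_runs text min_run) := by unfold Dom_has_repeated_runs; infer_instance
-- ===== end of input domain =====

-- B replaces A's indexed scan with a run counter by a substring test per distinct character (objective: simpler).

-- ===== PORT A =====
-- the for-loop over range(1, len(text)): at each step, the element is text[i] and
-- `prev` is text[i-1]; `run` is the current run counter.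
def hrrLoop (min_run : Int) : List Char → Char → Int → Bool
  | [], _, _ => false
  | c :: rest, prev, run =>
    if c == prev then
      if run + 1 ≥ min_run then true else hrrLoop min_run rest c (run + 1)
    else hrrLoop min_run rest c 1

def has_repeated_runs (text : String) (min_run : Int) : Bool :=
  match text.toList with
  | [] => false                                  -- if not text: return False
  | c :: rest => hrrLoop min_run rest c 1        -- run = 1; for i in range(1, len(text)) …

-- ===== PORT B =====
def has_repeated_runs_alt (text : String) (min_run : Int) : Bool :=
  let needed : Int := max min_run 2
  if needed > PySem.Str.len text then false
  else
    (PySem.Set.ofList text.toList).any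
      (fun ch => PySem.Chars.isIn (PySem.List.pyRepeat [ch] needed) text.toList)

-- ===== PRECONDITION & SPEC =====
def Spec_has_repeated_runs (text : String) (min_run : Int) (out : Bool) : Prop := out = has_repeated_runs_alt text min_run
instance (text : String) (min_run : Int) (out : Bool) : Decidable (Spec_has_repeated_runs text min_run out) := by unfold Spec_has_repeated_runs; infer_instance

-- ===== CLAIM (what is proved, stated in full; the proofs are below) =====
def Claim_equal_has_repeated_runs : Prop := ∀ (text : String) (min_run : Int), Dom_has_repeated_runs text min_run → Spec_has_repeated_runs text min_run (has_repeated_runs text min_run)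

-- ===== LEMMAS AND PROOFS =====

-- a replicate of length ≥ 1 that is an infix of `replicate j c ++ d :: rest` with
-- j < t and d ≠ c cannot straddle the boundary: it is an infix of `d :: rest`.
lemma repl_infix_drop {t : Nat} {c d : Char} (hne : d ≠ c) (rest : List Char) :
    ∀ j, j < t → ∀ ch, List.replicate t ch <:+: (List.replicate j c ++ d :: rest) →
      List.replicate t ch <:+: d :: rest := by
  intro j
  induction j with
  | zero => intro _ ch h; simpa using h
  | succ j ih =>
    intro hjt ch h
    rw [List.replicate_succ, List.cons_append, List.infix_cons_iff] at h
    rcases h with h | h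
    · -- prefix of the whole list: both c (index 0) and d (index j+1) lie in the
      -- replicate, so c = ch = d, contradicting d ≠ c
      exfalso
      rw [List.prefix_iff_eq_take] at h
      rw [List.length_replicate] at h
      obtain ⟨u, hu⟩ : ∃ u, t = (j+1) + (u+1) := ⟨t - j - 2, by omega⟩
      have hbig : c :: (List.replicate j c ++ d :: rest) = (c :: List.replicate j c) ++ d :: rest := by
        simp
      have hc : c ∈ List.replicate t ch := by
        rw [h]
        cases t with
        | zero => omega
        | succ t' => rw [List.take_succ_cons]; exact List.mem_cons_self ..
      have hd : d ∈ List.replicate t ch := by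
        rw [h, hbig, List.take_append]
        have hl1 : (c :: List.replicate j c).length = j + 1 := by simp
        rw [List.take_of_length_le (by rw [hl1]; omega), hl1]
        rw [show t - (j+1) = u + 1 by omega, List.take_succ_cons]
        exact List.mem_append_right _ (List.mem_cons_self ..)
      exact hne ((List.eq_of_mem_replicate hd).trans (List.eq_of_mem_replicate hc).symm)
    · exact ih (Nat.lt_of_succ_lt hjt) ch h

-- characterisation of A's loop: with run counter k ≥ 1 still below the effective
-- threshold, the loop returns true iff some character repeated (max m 2).toNat times
-- is an infix of the already-counted run followed by the rest.
lemma hrrLoop_iff (m : Int) : ∀ (rest : List Char) (c : Char) (k : Nat), 1 ≤ k → (k : Int) < max m 2 →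
    (hrrLoop m rest c (k : Int) = true ↔
      ∃ ch, List.replicate (max m 2).toNat ch <:+: (List.replicate k c ++ rest)) := by
  intro rest
  induction rest with
  | nil =>
    intro c k hk1 hkt
    simp only [hrrLoop, List.append_nil]
    constructor
    · intro h; cases h
    · rintro ⟨ch, h⟩
      exfalso
      have hs := h.sublist
      rw [List.sublist_replicate_iff] at hs
      rcases hs with ⟨n, hn, he⟩
      have : (max m 2).toNat = n := by
        have := congrArg List.length he; simpa using this
      omega
  | cons d rest ih =>
    intro c k hk1 hkt
    by_cases hdc : d = c
    · subst hdc
      have hlist : List.replicate k d ++ d :: rest = List.replicate (k+1) d ++ rest := by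
        rw [List.replicate_succ']; simp
      simp only [hrrLoop, beq_self_eq_true, if_true]
      by_cases hge : (k : Int) + 1 ≥ m
      · have htle : (max m 2).toNat ≤ k + 1 := by omega
        rw [if_pos hge]
        constructor
        · intro _
          refine ⟨d, ?_⟩
          rw [hlist]
          have : List.replicate (k+1) d =
              List.replicate (max m 2).toNat d ++ List.replicate (k+1 - (max m 2).toNat) d := by
            rw [← List.replicate_add]; congr 1; omega
          rw [this, List.append_assoc]
          exact (List.prefix_append _ _).isInfix
        · intro _; rfl
      · have hlt : ((k+1 : Nat) : Int) < max m 2 := by push_cast; omega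
        rw [if_neg (by omega : ¬ m ≤ (k:Int) + 1)]
        have := ih d (k+1) (by omega) hlt
        rw [show ((k:Int) + 1) = ((k+1 : Nat) : Int) by push_cast; ring]
        rw [this, hlist]
    · have hbeq : (d == c) = false := by simpa using hdc
      simp only [hrrLoop, hbeq]
      rw [if_neg Bool.false_ne_true]
      have hk : k < (max m 2).toNat := by omega
      have h1 := ih d 1 le_rfl (by norm_num)
      norm_num at h1
      rw [h1]
      constructor
      · rintro ⟨ch, h⟩
        exact ⟨ch, h.trans (List.suffix_append _ _).isInfix⟩
      · rintro ⟨ch, h⟩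
        exact ⟨ch, repl_infix_drop hdc rest k hk ch h⟩

lemma alt_iff (text : String) (m : Int) :
    has_repeated_runs_alt text m = true ↔
      ∃ ch, List.replicate (max m 2).toNat ch <:+: text.toList := by
  unfold has_repeated_runs_alt
  by_cases hbig : max m 2 > PySem.Str.len text
  · rw [if_pos hbig]
    rw [PySem.Str.len_eq] at hbig
    constructor
    · intro hf; cases hf
    · rintro ⟨ch, h⟩
      exfalso
      have hl := h.sublist.length_le
      rw [List.length_replicate] at hl
      omega
  rw [if_neg hbig]
  simp only [List.any_eq_true, PySem.List.pyRepeat_singleton, PySem.Chars.isIn_iff_infix]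
  constructor
  · rintro ⟨ch, _, h⟩; exact ⟨ch, h⟩
  · rintro ⟨ch, h⟩
    refine ⟨ch, ?_, h⟩
    rw [PySem.Set.mem_ofList]
    have hch : ch ∈ List.replicate (max m 2).toNat ch := by
      rw [List.mem_replicate]; constructor
      · omega
      · rfl
    exact h.sublist.subset hch

-- ===== VERDICT (by name: the statement is the Claim_ definition above) =====
theorem has_repeated_runs_spec : Claim_equal_has_repeated_runs := by
  intro text m _
  unfold Spec_has_repeated_runs
  rw [Bool.eq_iff_iff, alt_iff]
  unfold has_repeated_runs
  cases h : text.toList with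
  | nil =>
    constructor
    · intro hf; simp at hf
    · rintro ⟨ch, hinf⟩
      exfalso
      have hlme := hinf.sublist.length_le
      simp at hlme
  | cons c rest =>
    rw [show (1 : Int) = ((1:Nat) : Int) by rfl]
    rw [hrrLoop_iff m rest c 1 le_rfl (by omega)]
    simp
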